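-- pv_equiv track=rewrite | github.com/junghoon-kang/pytorch | vision/transform.py | __get_adjacent_tiles_indices
-- ===== SOURCE A (Python) =====
-- def __get_adjacent_tiles_indices(grid_size):
--     h, w = grid_size
--
--     last_col_indices = []
--     for i in range(h):
--         last_col_indices.append(w*i + (w-1))
--
--     last_row_indices = list(range((w*h)-w, w*h))
--
--     inner_tiles = []
--     for i in range((h * w) - 1):
--         if i not in last_row_indices and i not in last_col_indices:
--             inner_tiles.append([i, i+1, i+w, i+1+w])
--
--     first_col_indices = []
--     for i in range(h):
--         first_col_indices.append(w*i)
--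
--     first_row_indices = list(range(w))
--
--     boundary_tiles_first_row = []
--     for i in range(len(first_row_indices)-1):
--         boundary_tiles_first_row.append( [first_row_indices[i], first_row_indices[i+1]] )
--
--     boundary_tiles_last_row = []
--     for i in range(len(last_row_indices)-1):
--         boundary_tiles_last_row.append( [last_row_indices[i], last_row_indices[i+1]] )
--
--     boundary_tiles_first_col = []
--     for i in range(len(first_col_indices)-1):
--         boundary_tiles_first_col.append( [first_col_indices[i], first_col_indices[i+1]] )
--
--     boundary_tiles_last_col = []
--     for i in range(len(last_col_indices)-1):
--         boundary_tiles_last_col.append( [last_col_indices[i], last_col_indices[i+1]] )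
--
--     return (
--         inner_tiles,
--         boundary_tiles_first_row,
--         boundary_tiles_last_row,
--         boundary_tiles_first_col,
--         boundary_tiles_last_col,
--     )
-- ===== SOURCE B (Python) =====
-- def __get_adjacent_tiles_indices(grid_size):
--     h, w = grid_size
--
--     inner_tiles = []
--     for r in range(h - 1):
--         for c in range(w - 1):
--             i = r * w + c
--             inner_tiles.append([i, i + 1, i + w, i + 1 + w])
--
--     boundary_tiles_first_row = [[c, c + 1] for c in range(w - 1)]
--     boundary_tiles_last_row = [[(h - 1) * w + c, (h - 1) * w + c + 1] for c in range(w - 1)]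
--     boundary_tiles_first_col = [[r * w, (r + 1) * w] for r in range(h - 1)]
--     boundary_tiles_last_col = [[r * w + (w - 1), (r + 1) * w + (w - 1)] for r in range(h - 1)]
--
--     return (
--         inner_tiles,
--         boundary_tiles_first_row,
--         boundary_tiles_last_row,
--         boundary_tiles_first_col,
--         boundary_tiles_last_col,
--     )
-- ===== Notes on version B (the rewrite author's own statement) =====
-- stated objective: alternative
-- what changed: Inner tiles are generated directly by a nested loop over the grid interior (rows 0..h-2, cols 0..w-2) and each boundary list by a closed-form pairwise comprehension, eliminating A's last_row/last_col membership tables and the per-index linear 'in' scans.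
-- intended difference: On grids with both dimensions negative and more than one tile (h*w >= 2) A's scan over range(h*w-1) fabricates inner tiles with negative neighbour indices, while B returns no inner tiles; an empty result is the intended value for a non-positive grid. — e.g. on __get_adjacent_tiles_indices(-1, -2): A returns [[[0, 1, -2, -1]], [], [], [], []], B returns [[], [], [], [], []]
import Mathlib
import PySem

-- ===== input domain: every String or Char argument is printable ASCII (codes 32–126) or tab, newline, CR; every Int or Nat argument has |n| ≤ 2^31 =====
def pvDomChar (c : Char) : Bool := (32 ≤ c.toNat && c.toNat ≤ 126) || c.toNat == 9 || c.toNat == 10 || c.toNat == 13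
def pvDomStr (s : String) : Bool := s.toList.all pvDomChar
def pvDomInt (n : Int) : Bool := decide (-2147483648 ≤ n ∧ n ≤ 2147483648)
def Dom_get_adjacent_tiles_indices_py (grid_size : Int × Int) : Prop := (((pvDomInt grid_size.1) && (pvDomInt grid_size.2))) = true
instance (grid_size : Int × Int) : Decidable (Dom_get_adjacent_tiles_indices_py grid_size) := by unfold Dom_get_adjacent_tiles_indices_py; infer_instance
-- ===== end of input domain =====

-- B builds the inner tiles by a nested loop over the grid interior and each boundary list by a
-- closed-form pairwise comprehension, removing A's membership tables and linear `in` scans.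

-- ===== PORT A =====
def get_adjacent_tiles_indices_py (grid_size : Int × Int) : List (List (List Int)) :=
  let h := grid_size.1
  let w := grid_size.2
  let last_col_indices := (PySem.List.pyRange 0 h 1).foldl (fun acc i => acc ++ [w*i + (w-1)]) []
  let last_row_indices := PySem.List.pyRange (w*h - w) (w*h) 1
  let inner_tiles := (PySem.List.pyRange 0 (h*w - 1) 1).foldl
    (fun acc i => if !(last_row_indices.contains i) && !(last_col_indices.contains i)
                  then acc ++ [[i, i+1, i+w, i+1+w]] else acc) []
  let first_col_indices := (PySem.List.pyRange 0 h 1).foldl (fun acc i => acc ++ [w*i]) []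
  let first_row_indices := PySem.List.pyRange 0 w 1
  let boundary_tiles_first_row := (PySem.List.pyRange 0 (PySem.List.len first_row_indices - 1) 1).foldl
    (fun acc i => acc ++ [[PySem.List.pyGetD first_row_indices i 0, PySem.List.pyGetD first_row_indices (i+1) 0]]) []
  let boundary_tiles_last_row := (PySem.List.pyRange 0 (PySem.List.len last_row_indices - 1) 1).foldl
    (fun acc i => acc ++ [[PySem.List.pyGetD last_row_indices i 0, PySem.List.pyGetD last_row_indices (i+1) 0]]) []
  let boundary_tiles_first_col := (PySem.List.pyRange 0 (PySem.List.len first_col_indices - 1) 1).foldl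
    (fun acc i => acc ++ [[PySem.List.pyGetD first_col_indices i 0, PySem.List.pyGetD first_col_indices (i+1) 0]]) []
  let boundary_tiles_last_col := (PySem.List.pyRange 0 (PySem.List.len last_col_indices - 1) 1).foldl
    (fun acc i => acc ++ [[PySem.List.pyGetD last_col_indices i 0, PySem.List.pyGetD last_col_indices (i+1) 0]]) []
  [inner_tiles, boundary_tiles_first_row, boundary_tiles_last_row,
   boundary_tiles_first_col, boundary_tiles_last_col]

-- ===== PORT B =====
def get_adjacent_tiles_indices_py_alt (grid_size : Int × Int) : List (List (List Int)) :=
  let h := grid_size.1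
  let w := grid_size.2
  let inner_tiles := (PySem.List.pyRange 0 (h - 1) 1).foldl (fun acc r =>
    (PySem.List.pyRange 0 (w - 1) 1).foldl (fun acc2 c =>
      let i := r*w + c
      acc2 ++ [[i, i+1, i+w, i+1+w]]) acc) []
  let boundary_tiles_first_row := (PySem.List.pyRange 0 (w - 1) 1).map (fun c => [c, c+1])
  let boundary_tiles_last_row := (PySem.List.pyRange 0 (w - 1) 1).map (fun c => [(h-1)*w + c, (h-1)*w + c + 1])
  let boundary_tiles_first_col := (PySem.List.pyRange 0 (h - 1) 1).map (fun r => [r*w, (r+1)*w])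
  let boundary_tiles_last_col := (PySem.List.pyRange 0 (h - 1) 1).map (fun r => [r*w + (w-1), (r+1)*w + (w-1)])
  [inner_tiles, boundary_tiles_first_row, boundary_tiles_last_row,
   boundary_tiles_first_col, boundary_tiles_last_col]

-- ===== PRECONDITION & SPEC =====
-- On grids with both dimensions negative and more than one tile (h*w >= 2) A's scan over range(h*w-1)
-- fabricates inner tiles with negative neighbour indices, while B returns no inner tiles; an empty
-- result is the intended value for a non-positive grid.
def D_get_adjacent_tiles_indices_py (grid_size : Int × Int) : Prop :=
  grid_size.1 < 0 ∧ grid_size.2 < 0 ∧ 2 ≤ grid_size.1 * grid_size.2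
instance (grid_size : Int × Int) : Decidable (D_get_adjacent_tiles_indices_py grid_size) := by
  unfold D_get_adjacent_tiles_indices_py; infer_instance

def Spec_get_adjacent_tiles_indices_py (grid_size : Int × Int) (out : List (List (List Int))) : Prop :=
  ¬ D_get_adjacent_tiles_indices_py grid_size → out = get_adjacent_tiles_indices_py_alt grid_size
instance (grid_size : Int × Int) (out : List (List (List Int))) : Decidable (Spec_get_adjacent_tiles_indices_py grid_size out) := by
  unfold Spec_get_adjacent_tiles_indices_py; infer_instance

def pvDiffWitness_get_adjacent_tiles_indices_py : (Int × Int) := (-1, -2)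
def pvDiffWitnessOut_get_adjacent_tiles_indices_py : (List (List (List Int))) × (List (List (List Int))) :=
  ([[[0, 1, -2, -1]], [], [], [], []], [[], [], [], [], []])

-- ===== CLAIM (what is proved, stated in full; the proofs are below) =====
def Claim_unchanged_get_adjacent_tiles_indices_py : Prop := ∀ (grid_size : Int × Int), Dom_get_adjacent_tiles_indices_py grid_size → Spec_get_adjacent_tiles_indices_py grid_size (get_adjacent_tiles_indices_py grid_size)
def Claim_changed_get_adjacent_tiles_indices_py : Prop := Dom_get_adjacent_tiles_indices_py (pvDiffWitness_get_adjacent_tiles_indices_py) ∧ D_get_adjacent_tiles_indices_py (pvDiffWitness_get_adjacent_tiles_indices_py) ∧ get_adjacent_tiles_indices_py (pvDiffWitness_get_adjacent_tiles_indices_py) = pvDiffWitnessOut_get_adjacent_tiles_indices_py.1 ∧ get_adjacent_tiles_indices_py_alt (pvDiffWitness_get_adjacent_tiles_indices_py) = pvDiffWitnessOut_get_adjacent_tiles_indices_py.2 ∧ pvDiffWitnessOut_get_adjacent_tiles_indices_py.1 ≠ pvDiffWitnessOut_get_adjacent_tiles_indices_py.2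
def Claim_exact_get_adjacent_tiles_indices_py : Prop := ∀ (grid_size : Int × Int), Dom_get_adjacent_tiles_indices_py grid_size → D_get_adjacent_tiles_indices_py grid_size → get_adjacent_tiles_indices_py grid_size ≠ get_adjacent_tiles_indices_py_alt grid_size

-- ===== LEMMAS AND PROOFS =====


theorem pyRange_shift (a b : Int) :
    PySem.List.pyRange a b 1 = (PySem.List.pyRange 0 (b - a) 1).map (fun i => a + i) := by
  rw [PySem.List.pyRange_one, PySem.List.pyRange_one]
  simp [List.map_map, Function.comp]

theorem boundary_pairs (f : Int → Int) (n : Int) :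
    (PySem.List.pyRange 0 (PySem.List.len ((PySem.List.pyRange 0 n 1).map f) - 1) 1).map
      (fun i => [PySem.List.pyGetD ((PySem.List.pyRange 0 n 1).map f) i 0,
                 PySem.List.pyGetD ((PySem.List.pyRange 0 n 1).map f) (i+1) 0])
    = (PySem.List.pyRange 0 (n - 1) 1).map (fun i => [f i, f (i+1)]) := by
  rw [PySem.List.len_eq]
  simp only [List.length_map, PySem.List.length_pyRange_one]
  rw [PySem.List.pyRange_one 0 ((((n - 0).toNat : Int)) - 1), PySem.List.pyRange_one 0 (n-1)]
  have hN : (((n - 0).toNat : Int) - 1 - 0).toNat = (n - 1 - 0).toNat := by omega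
  rw [hN, List.map_map, List.map_map]
  apply List.map_congr_left
  intro k hk
  simp only [List.mem_range] at hk
  have hk1 : (k : Int) < n - 1 := by omega
  simp only [Function.comp]
  rw [PySem.List.pyGetD_map_pyRange_of_nonneg f n (0 + (k:Int)) 0 (by omega) (by omega),
      PySem.List.pyGetD_map_pyRange_of_nonneg f n (0 + (k:Int) + 1) 0 (by omega) (by omega)]

theorem inner_blocks (w : Int) (hw : 1 ≤ w) (n : ℕ) :
    ((PySem.List.pyRange 0 (w * (n : Int)) 1).filter (fun i => !decide ((w : Int) ∣ i + 1))).map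
        (fun i => [i, i+1, i+w, i+1+w])
    = (PySem.List.pyRange 0 (n : Int) 1).flatMap (fun r =>
        (PySem.List.pyRange 0 (w - 1) 1).map (fun c => [r*w + c, r*w + c + 1, r*w + c + w, r*w + c + 1 + w])) := by
  induction n with
  | zero => simp [PySem.List.pyRange_one_eq_nil]
  | succ m ih =>
    have h1 : w * ((m+1 : ℕ) : Int) = w * (m : Int) + w := by push_cast; ring
    rw [h1, PySem.List.pyRange_one_append 0 (w * (m : Int)) (w * (m : Int) + w) (by positivity) (by omega),
        List.filter_append, List.map_append, ih]
    have h2 : ((m+1 : ℕ) : Int) = (m : Int) + 1 := by push_cast; ring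
    rw [h2, PySem.List.pyRange_one_succ_right (by positivity), List.flatMap_append]
    congr 1
    simp only [List.flatMap_cons, List.flatMap_nil, List.append_nil]
    have h3 : w * (m:Int) + w = (w * (m:Int) + (w - 1)) + 1 := by ring
    rw [h3, PySem.List.pyRange_one_succ_right (by omega), List.filter_append]
    have hlast : List.filter (fun i => !decide ((w:Int) ∣ i + 1)) [w * (m:Int) + (w-1)] = [] := by
      simp only [List.filter_cons, List.filter_nil]
      have : (w:Int) ∣ (w * (m:Int) + (w-1)) + 1 := ⟨(m:Int)+1, by ring⟩
      simp [this]
    rw [hlast, List.append_nil]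
    have hall : List.filter (fun i => !decide ((w:Int) ∣ i + 1)) (PySem.List.pyRange (w * (m:Int)) (w * (m:Int) + (w-1)) 1)
        = PySem.List.pyRange (w * (m:Int)) (w * (m:Int) + (w-1)) 1 := by
      apply List.filter_eq_self.mpr
      intro i hi
      rw [PySem.List.mem_pyRange_one] at hi
      have hnd : ¬ ((w:Int) ∣ i + 1) := by
        rintro ⟨k, hk⟩
        have hlb : w * (m:Int) < w * k := by omega
        have hub : w * k < w * ((m:Int)+1) := by nlinarith
        have h4 : (m:Int) < k := lt_of_mul_lt_mul_left hlb (by omega)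
        have h5 : k < (m:Int) + 1 := lt_of_mul_lt_mul_left hub (by omega)
        omega
      simp [hnd]
    rw [hall, pyRange_shift, List.map_map]
    have h6 : w * (m:Int) + (w - 1) - w * (m:Int) = w - 1 := by ring
    rw [h6]
    apply List.map_congr_left
    intro c hc
    simp only [Function.comp_apply]
    ring_nf

theorem inner_pos (h w : Int) (hh : 1 ≤ h) (hw : 1 ≤ w) :
    ((PySem.List.pyRange 0 (h*w - 1) 1).filter
        (fun i => !((PySem.List.pyRange (w*h - w) (w*h) 1).contains i)
                  && !(((PySem.List.pyRange 0 h 1).map (fun i => w*i + (w-1))).contains i))).map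
        (fun i => [i, i+1, i+w, i+1+w])
    = (PySem.List.pyRange 0 (h - 1) 1).flatMap (fun r =>
        (PySem.List.pyRange 0 (w - 1) 1).map (fun c => [r*w + c, r*w + c + 1, r*w + c + w, r*w + c + 1 + w])) := by
  have hr : h*w - 1 = w*(h-1) + (w-1) := by ring
  have hr2 : w*(h-1) = w*h - w := by ring
  have hsplit : PySem.List.pyRange 0 (h*w - 1) 1
      = PySem.List.pyRange 0 (w*(h-1)) 1 ++ PySem.List.pyRange (w*(h-1)) (h*w - 1) 1 := by
    apply PySem.List.pyRange_one_append 0 (w*(h-1)) (h*w-1)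
    · exact mul_nonneg (by omega) (by omega)
    · linarith
  rw [hsplit, List.filter_append]
  have hsecond : (PySem.List.pyRange (w*(h-1)) (h*w - 1) 1).filter
      (fun i => !((PySem.List.pyRange (w*h - w) (w*h) 1).contains i)
                && !(((PySem.List.pyRange 0 h 1).map (fun i => w*i + (w-1))).contains i)) = [] := by
    apply List.filter_eq_nil_iff.mpr
    intro i hi
    rw [PySem.List.mem_pyRange_one] at hi
    have hmem : i ∈ PySem.List.pyRange (w*h - w) (w*h) 1 := by
      rw [PySem.List.mem_pyRange_one]
      constructor
      · linarith [hi.1]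
      · linarith [hi.2]
    simp [hmem]
  rw [hsecond, List.append_nil]
  have hfirst : (PySem.List.pyRange 0 (w*(h-1)) 1).filter
      (fun i => !((PySem.List.pyRange (w*h - w) (w*h) 1).contains i)
                && !(((PySem.List.pyRange 0 h 1).map (fun i => w*i + (w-1))).contains i))
      = (PySem.List.pyRange 0 (w*(h-1)) 1).filter (fun i => !decide ((w:Int) ∣ i + 1)) := by
    apply List.filter_congr
    intro i hi
    rw [PySem.List.mem_pyRange_one] at hi
    have hlr : ((PySem.List.pyRange (w*h - w) (w*h) 1).contains i) = false := by
      apply Bool.eq_false_iff.mpr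
      intro hc
      have hx := PySem.List.mem_pyRange_one.mp (List.mem_of_elem_eq_true hc)
      linarith [hi.2, hx.1]
    have hlc : (((PySem.List.pyRange 0 h 1).map (fun i => w*i + (w-1))).contains i) = decide ((w:Int) ∣ i + 1) := by
      by_cases hd : (w:Int) ∣ i + 1
      · obtain ⟨k, hk⟩ := hd
        have hk1 : 1 ≤ k := by
          by_contra hkk
          push_neg at hkk
          have hkn : w * k ≤ 0 := mul_nonpos_iff.mpr (Or.inl ⟨by omega, by omega⟩)
          linarith [hi.1]
        have hkh : k ≤ h - 1 := by
          by_contra hkk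
          push_neg at hkk
          have h7 : w * h ≤ w * k := mul_le_mul_of_nonneg_left (by omega) (by omega)
          linarith [hi.2]
        have hmm : i ∈ (PySem.List.pyRange 0 h 1).map (fun i => w*i + (w-1)) := by
          refine List.mem_map.mpr ⟨k - 1, ?_, ?_⟩
          · rw [PySem.List.mem_pyRange_one]; omega
          · ring_nf
            ring_nf at hk
            linarith [hk]
        simp [hmm, decide_eq_true (show (w:Int) ∣ i + 1 from ⟨k, hk⟩)]
      · have hnm : ((PySem.List.pyRange 0 h 1).map (fun i => w*i + (w-1))).contains i = false := by
          apply Bool.eq_false_iff.mpr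
          intro hc
          obtain ⟨j, hj, hji⟩ := List.mem_map.mp (List.mem_of_elem_eq_true hc)
          exact hd ⟨j + 1, by linarith [hji]⟩
        rw [hnm, decide_eq_false hd]
    rw [hlr, hlc]
    simp
  rw [hfirst]
  have hcast2 : (h - 1) = (((h-1).toNat : ℕ) : Int) := by
    rw [Int.toNat_of_nonneg (by omega)]
  rw [hcast2]
  exact inner_blocks w hw (h-1).toNat

theorem boundary_pairs_range (a b : Int) :
    (PySem.List.pyRange 0 (PySem.List.len (PySem.List.pyRange a b 1) - 1) 1).map
      (fun i => [PySem.List.pyGetD (PySem.List.pyRange a b 1) i 0,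
                 PySem.List.pyGetD (PySem.List.pyRange a b 1) (i+1) 0])
    = (PySem.List.pyRange 0 (b - a - 1) 1).map (fun i => [a + i, a + i + 1]) := by
  rw [pyRange_shift a b, boundary_pairs (fun i => a + i) (b - a)]
  apply List.map_congr_left
  intro c hc
  ring_nf

-- ===== VERDICT (by name: the statement is the Claim_ definition above) =====
theorem get_adjacent_tiles_indices_py_spec : Claim_unchanged_get_adjacent_tiles_indices_py := by
  intro gs _
  unfold Spec_get_adjacent_tiles_indices_py
  intro hnd
  obtain ⟨h, w⟩ := gs
  simp only [D_get_adjacent_tiles_indices_py, not_and, not_le] at hnd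
  simp only [get_adjacent_tiles_indices_py, get_adjacent_tiles_indices_py_alt,
             PySem.List.foldl_append_singleton_eq_map, PySem.List.foldl_append_eq_flatMap,
             List.nil_append]
  rw [PySem.List.foldl_append_if, List.nil_append]
  simp only [List.cons.injEq, and_true]
  refine ⟨?_, ?_, ?_, ?_, ?_⟩
  · -- inner tiles
    by_cases hpos : 1 ≤ h ∧ 1 ≤ w
    · exact inner_pos h w hpos.1 hpos.2
    · have hdeg : h ≤ 0 ∨ w ≤ 0 := by
        by_contra hc
        push_neg at hc
        exact hpos ⟨by omega, by omega⟩
      have hA : h * w - 1 ≤ 0 := by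
        rcases lt_trichotomy h 0 with h0 | h0 | h0
        · rcases lt_trichotomy w 0 with w0 | w0 | w0
          · have := hnd h0 w0
            omega
          · simp [w0]
          · have : h * w ≤ 0 := mul_nonpos_of_nonpos_of_nonneg (by omega) (by omega)
            omega
        · simp [h0]
        · have hw0 : w ≤ 0 := by
            rcases hdeg with hd | hd
            · omega
            · exact hd
          have : h * w ≤ 0 := mul_nonpos_of_nonneg_of_nonpos (by omega) hw0
          omega
      rw [PySem.List.pyRange_one_eq_nil (by omega : h * w - 1 ≤ 0)]
      rcases hdeg with hd | hd
      · rw [PySem.List.pyRange_one_eq_nil (by omega : h - 1 ≤ 0)]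
        simp
      · rw [PySem.List.pyRange_one_eq_nil (by omega : w - 1 ≤ 0)]
        simp
  · -- first row boundary
    rw [boundary_pairs_range 0 w]
    have e : w - 0 - 1 = w - 1 := by ring
    rw [e]
    apply List.map_congr_left
    intro c hc
    ring_nf
  · -- last row boundary
    rw [boundary_pairs_range (w*h - w) (w*h)]
    have e : w*h - (w*h - w) - 1 = w - 1 := by ring
    rw [e]
    apply List.map_congr_left
    intro c hc
    ring_nf
  · -- first col boundary
    rw [boundary_pairs (fun i => w*i) h]
    apply List.map_congr_left
    intro c hc
    ring_nf
  · -- last col boundary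
    rw [boundary_pairs (fun i => w*i + (w-1)) h]
    apply List.map_congr_left
    intro c hc
    ring_nf

theorem get_adjacent_tiles_indices_py_changed : Claim_changed_get_adjacent_tiles_indices_py := by
  unfold Claim_changed_get_adjacent_tiles_indices_py; decide

theorem get_adjacent_tiles_indices_py_tight : Claim_exact_get_adjacent_tiles_indices_py := by
  intro gs _ hD heq
  obtain ⟨h, w⟩ := gs
  obtain ⟨hh, hw, hp⟩ := hD
  simp only at hh hw hp
  have hcomm : w * h = h * w := by ring
  simp only [get_adjacent_tiles_indices_py, get_adjacent_tiles_indices_py_alt,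
             PySem.List.foldl_append_singleton_eq_map, PySem.List.foldl_append_eq_flatMap,
             List.nil_append] at heq
  rw [PySem.List.foldl_append_if, List.nil_append] at heq
  simp only [List.cons.injEq] at heq
  have h1 := heq.1
  rw [PySem.List.pyRange_one_eq_nil (by omega : h - 1 ≤ 0)] at h1
  simp only [List.flatMap_nil, List.map_eq_nil_iff, List.filter_eq_nil_iff] at h1
  have hmem0 : (0 : Int) ∈ PySem.List.pyRange 0 (h*w - 1) 1 := by
    rw [PySem.List.mem_pyRange_one]
    omega
  have := h1 0 hmem0
  apply this
  have hlr : ((PySem.List.pyRange (w*h - w) (w*h) 1).contains 0) = false := by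
    apply Bool.eq_false_iff.mpr
    intro hc
    have hx := PySem.List.mem_pyRange_one.mp (List.mem_of_elem_eq_true hc)
    have := hx.1
    omega
  have hlc : (((PySem.List.pyRange 0 h 1).map (fun i => w*i + (w-1))).contains 0) = false := by
    rw [PySem.List.pyRange_one_eq_nil (by omega : h ≤ 0)]
    rfl
  rw [hlr, hlc]
  rfl
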